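-- pv_equiv track=rewrite | github.com/Ombhavsar218/redscan | rescanai/scan_controller.py | _get_sqli_test_messages
-- ===== SOURCE A (Python) =====
-- from typing import Dict, List, Any, Optional, Callable
--
-- def _get_sqli_test_messages(step_count: int) -> List[str]:
--     """Generate different SQL injection test messages"""
--     base_messages = [
--         "Initializing SQL injection scanner...",
--         "Testing homepage for SQLi...",
--         "Checking login forms...",
--         "Testing search functionality...",
--         "Analyzing URL parameters...",
--         "Testing GET parameters...",
--         "Checking POST data handling...",
--         "Testing error-based SQLi...",
--         "Checking boolean-based SQLi...",
--         "Testing time-based SQLi...",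
--         "Analyzing database errors...",
--         "Checking for MySQL injection...",
--         "Testing PostgreSQL patterns...",
--         "Checking SQLite vulnerabilities...",
--         "Testing MSSQL injection...",
--         "Analyzing injection points...",
--         "Checking form inputs...",
--         "Testing cookie parameters...",
--         "Analyzing HTTP headers...",
--         "Checking JSON parameters...",
--         "Testing XML input handling...",
--         "Verifying input sanitization...",
--         "Checking parameterized queries...",
--         "Testing stored procedures...",
--         "Analyzing database responses...",
--         "Finalizing SQLi assessment..."
--     ]
--
--     messages = []
--     for i in range(step_count):
--         messages.append(base_messages[i % len(base_messages)])
--     return messages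
-- ===== SOURCE B (Python) =====
-- from typing import Dict, List, Any, Optional, Callable
--
-- def _get_sqli_test_messages(step_count: int) -> List[str]:
--     """Generate different SQL injection test messages"""
--     base_messages = [
--         "Initializing SQL injection scanner...",
--         "Testing homepage for SQLi...",
--         "Checking login forms...",
--         "Testing search functionality...",
--         "Analyzing URL parameters...",
--         "Testing GET parameters...",
--         "Checking POST data handling...",
--         "Testing error-based SQLi...",
--         "Checking boolean-based SQLi...",
--         "Testing time-based SQLi...",
--         "Analyzing database errors...",
--         "Checking for MySQL injection...",
--         "Testing PostgreSQL patterns...",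
--         "Checking SQLite vulnerabilities...",
--         "Testing MSSQL injection...",
--         "Analyzing injection points...",
--         "Checking form inputs...",
--         "Testing cookie parameters...",
--         "Analyzing HTTP headers...",
--         "Checking JSON parameters...",
--         "Testing XML input handling...",
--         "Verifying input sanitization...",
--         "Checking parameterized queries...",
--         "Testing stored procedures...",
--         "Analyzing database responses...",
--         "Finalizing SQLi assessment..."
--     ]
--     n = max(0, step_count)
--     full, rem = divmod(n, len(base_messages))
--     return base_messages * full + base_messages[:rem]
-- ===== Notes on version B (the rewrite author's own statement) =====
-- stated objective: faster
-- what changed: Replaces the per-index modulo append loop with whole-list repetition (base * full) plus one slice for the remainder, computed by a single divmod after clamping step_count to 0.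
import Mathlib
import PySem

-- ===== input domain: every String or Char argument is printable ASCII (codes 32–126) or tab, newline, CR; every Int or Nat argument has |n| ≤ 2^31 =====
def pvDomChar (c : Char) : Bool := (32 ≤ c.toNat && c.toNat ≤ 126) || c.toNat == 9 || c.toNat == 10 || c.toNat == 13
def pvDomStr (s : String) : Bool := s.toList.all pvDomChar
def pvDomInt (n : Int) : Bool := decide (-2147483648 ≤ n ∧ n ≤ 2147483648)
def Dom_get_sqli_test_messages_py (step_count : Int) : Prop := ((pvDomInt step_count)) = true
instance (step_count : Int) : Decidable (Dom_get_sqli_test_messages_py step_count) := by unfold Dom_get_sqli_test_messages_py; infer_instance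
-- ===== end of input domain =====

-- B replaces the per-index modulo append loop by divmod + whole-list repetition + one slice.

-- the base_messages literal shared by both Pythons
def pvBaseMessages : List String := [
  "Initializing SQL injection scanner...",
  "Testing homepage for SQLi...",
  "Checking login forms...",
  "Testing search functionality...",
  "Analyzing URL parameters...",
  "Testing GET parameters...",
  "Checking POST data handling...",
  "Testing error-based SQLi...",
  "Checking boolean-based SQLi...",
  "Testing time-based SQLi...",
  "Analyzing database errors...",
  "Checking for MySQL injection...",
  "Testing PostgreSQL patterns...",
  "Checking SQLite vulnerabilities...",
  "Testing MSSQL injection...",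
  "Analyzing injection points...",
  "Checking form inputs...",
  "Testing cookie parameters...",
  "Analyzing HTTP headers...",
  "Checking JSON parameters...",
  "Testing XML input handling...",
  "Verifying input sanitization...",
  "Checking parameterized queries...",
  "Testing stored procedures...",
  "Analyzing database responses...",
  "Finalizing SQLi assessment..."]

-- ===== PORT A =====
-- for i in range(step_count): messages.append(base_messages[i % len(base_messages)])
-- (index i % 26 is always in range, so pyGetD with dummy default "" is exact)
def get_sqli_test_messages_py (step_count : Int) : List String :=
  (PySem.List.pyRange 0 step_count).foldl
    (fun messages i =>
      messages ++ [PySem.List.pyGetD pvBaseMessages (PySem.Int.mod i (pvBaseMessages.length : Int)) ""])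
    []

-- ===== PORT B =====
-- n = max(0, step_count); full, rem = divmod(n, len(base)); return base * full + base[:rem]
def get_sqli_test_messages_py_alt (step_count : Int) : List String :=
  let n := max 0 step_count
  let full := PySem.Int.floordiv n (pvBaseMessages.length : Int)
  let rem := PySem.Int.mod n (pvBaseMessages.length : Int)
  (List.replicate full.toNat pvBaseMessages).flatten ++ PySem.List.slice pvBaseMessages none (some rem)

-- ===== PRECONDITION & SPEC =====
def Spec_get_sqli_test_messages_py (step_count : Int) (out : List String) : Prop := out = get_sqli_test_messages_py_alt step_count
instance (step_count : Int) (out : List String) : Decidable (Spec_get_sqli_test_messages_py step_count out) := by unfold Spec_get_sqli_test_messages_py; infer_instance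

-- ===== CLAIM (what is proved, stated in full; the proofs are below) =====
def Claim_equal_get_sqli_test_messages_py : Prop := ∀ (step_count : Int), Dom_get_sqli_test_messages_py step_count → Spec_get_sqli_test_messages_py step_count (get_sqli_test_messages_py step_count)

-- ===== LEMMAS AND PROOFS =====

-- A's loop on a nonnegative count n builds ⌊n/26⌋ full copies of the base list plus its first n%26 entries.
theorem pvLoopA (n : Nat) :
    get_sqli_test_messages_py (n : Int) =
      (List.replicate (n / 26) pvBaseMessages).flatten ++ pvBaseMessages.take (n % 26) := by
  induction n with
  | zero => rfl
  | succ n ih =>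
    unfold get_sqli_test_messages_py at *
    have hcast : ((n + 1 : Nat) : Int) = (n : Int) + 1 := by push_cast; ring
    rw [hcast, PySem.List.pyRange_one_succ_right (by positivity), List.foldl_append, ih]
    simp only [List.foldl]
    have hlen : (pvBaseMessages.length : Int) = (26 : Nat) := by rfl
    rw [hlen, PySem.Int.mod_natCast n 26, PySem.List.pyGetD_natCast]
    have hr : n % 26 < 26 := Nat.mod_lt _ (by omega)
    have hgetD : pvBaseMessages.getD (n % 26) "" = pvBaseMessages[n % 26]'(by simp [pvBaseMessages]; omega) := by
      rw [List.getD_eq_getElem?_getD, List.getElem?_eq_getElem (by simp [pvBaseMessages]; omega)]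
      rfl
    have htake : pvBaseMessages.take (n % 26) ++ [pvBaseMessages[n % 26]'(by simp [pvBaseMessages]; omega)] =
        pvBaseMessages.take (n % 26 + 1) := by
      rw [List.take_add_one, List.getElem?_eq_getElem (by simp [pvBaseMessages]; omega)]
      rfl
    rw [hgetD, List.append_assoc, htake]
    by_cases h26 : n % 26 = 25
    · have hdiv : (n + 1) / 26 = n / 26 + 1 := by omega
      have hmod : (n + 1) % 26 = 0 := by omega
      rw [hdiv, hmod, h26]
      have : pvBaseMessages.take 26 = pvBaseMessages := by rfl
      rw [this, List.replicate_succ', List.flatten_append]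
      simp
    · have hdiv : (n + 1) / 26 = n / 26 := by omega
      have hmod : (n + 1) % 26 = n % 26 + 1 := by omega
      rw [hdiv, hmod]

-- ===== VERDICT (by name: the statement is the Claim_ definition above) =====
theorem get_sqli_test_messages_py_spec : Claim_equal_get_sqli_test_messages_py := by
  intro step_count _
  unfold Spec_get_sqli_test_messages_py
  by_cases h : step_count ≤ 0
  · unfold get_sqli_test_messages_py get_sqli_test_messages_py_alt
    rw [PySem.List.pyRange_one_eq_nil h, max_eq_left h]
    rfl
  · obtain ⟨n, rfl⟩ : ∃ n : Nat, step_count = (n : Int) :=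
      ⟨step_count.toNat, (Int.toNat_of_nonneg (by omega)).symm⟩
    rw [pvLoopA]
    unfold get_sqli_test_messages_py_alt
    have hmax : max 0 ((n : Nat) : Int) = (n : Int) := by omega
    have hlen : (pvBaseMessages.length : Int) = (26 : Nat) := by rfl
    simp only [hmax, hlen, PySem.Int.floordiv_natCast, PySem.Int.mod_natCast,
      Int.toNat_natCast, PySem.List.slice_to_natCast]
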